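-- pv_equiv track=rewrite | github.com/SaltTheFields/phantom-off-network-agent | web_app.py | _depth_bar
-- ===== SOURCE A (Python) =====
-- def _depth_bar(depth: int) -> str:
--     MAX = 6
--     pips = "".join(
--         f'<span class="depth-pip {"filled" if i < depth and depth < 3 else "deep" if i < depth else ""}" title="depth {depth}"></span>'
--         for i in range(MAX)
--     )
--     lbl = f'<span style="color:#444;font-size:10px;margin-left:4px">{depth}</span>'
--     return f'<span class="depth-bar">{pips}</span>{lbl}'
-- ===== SOURCE B (Python) =====
-- def _depth_bar(depth: int) -> str:
--     MAX = 6
--     n = max(0, min(depth, MAX))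
--     fill = "filled" if depth < 3 else "deep"
--     lit = f'<span class="depth-pip {fill}" title="depth {depth}"></span>'
--     empty = f'<span class="depth-pip " title="depth {depth}"></span>'
--     pips = lit * n + empty * (MAX - n)
--     return f'<span class="depth-bar">{pips}</span><span style="color:#444;font-size:10px;margin-left:4px">{depth}</span>'
-- ===== Notes on version B (the rewrite author's own statement) =====
-- stated objective: simpler
-- what changed: Replaces the per-index branching generator over range(6) by a closed-form clamped count n = max(0, min(depth, 6)) with string multiplication of two fixed pip templates (lit*n + empty*(6-n)).
import Mathlib
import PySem

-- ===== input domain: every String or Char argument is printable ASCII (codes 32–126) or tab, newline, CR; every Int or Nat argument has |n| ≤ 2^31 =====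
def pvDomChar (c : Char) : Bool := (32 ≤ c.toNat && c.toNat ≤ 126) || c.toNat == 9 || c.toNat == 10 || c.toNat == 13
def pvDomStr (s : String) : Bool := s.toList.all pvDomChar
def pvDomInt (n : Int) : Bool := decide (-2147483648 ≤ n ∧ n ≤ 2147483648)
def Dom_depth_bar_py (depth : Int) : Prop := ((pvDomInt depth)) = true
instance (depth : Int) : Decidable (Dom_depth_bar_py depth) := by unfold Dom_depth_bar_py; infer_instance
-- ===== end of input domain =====

-- B builds the pip row from a clamped lit-pip count and template repetition instead of A's
-- per-index branching generator; objective: simpler (same cost).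

-- ===== PORT A =====
-- one pip of A's generator expression, for index i
def pvPipA (depth : Int) (i : Int) : String :=
  "<span class=\"depth-pip " ++
    (if i < depth ∧ depth < 3 then "filled" else if i < depth then "deep" else "") ++
    "\" title=\"depth " ++ PySem.Int.toStr depth ++ "\"></span>"

def depth_bar_py (depth : Int) : String :=
  let pips := ((PySem.List.pyRange 0 6 1).map (pvPipA depth)).foldl (· ++ ·) ""
  let lbl := "<span style=\"color:#444;font-size:10px;margin-left:4px\">" ++ PySem.Int.toStr depth ++ "</span>"
  "<span class=\"depth-bar\">" ++ pips ++ "</span>" ++ lbl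

-- ===== PORT B =====
-- Python's  s * n  for n ≥ 0
def pvStrMul (s : String) (n : Nat) : String := String.join (List.replicate n s)

def depth_bar_py_alt (depth : Int) : String :=
  let n := max 0 (min depth 6)
  let fill := if depth < 3 then "filled" else "deep"
  let lit := "<span class=\"depth-pip " ++ fill ++ "\" title=\"depth " ++ PySem.Int.toStr depth ++ "\"></span>"
  let empty := "<span class=\"depth-pip \" title=\"depth " ++ PySem.Int.toStr depth ++ "\"></span>"
  let pips := pvStrMul lit n.toNat ++ pvStrMul empty (6 - n).toNat
  "<span class=\"depth-bar\">" ++ pips ++ "</span>" ++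
    "<span style=\"color:#444;font-size:10px;margin-left:4px\">" ++ PySem.Int.toStr depth ++ "</span>"

-- ===== PRECONDITION & SPEC =====
def Spec_depth_bar_py (depth : Int) (out : String) : Prop := out = depth_bar_py_alt depth
instance (depth : Int) (out : String) : Decidable (Spec_depth_bar_py depth out) := by unfold Spec_depth_bar_py; infer_instance

-- ===== CLAIM (what is proved, stated in full; the proofs are below) =====
def Claim_equal_depth_bar_py : Prop := ∀ (depth : Int), Dom_depth_bar_py depth → Spec_depth_bar_py depth (depth_bar_py depth)

-- ===== LEMMAS AND PROOFS =====
set_option maxRecDepth 20000 in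
set_option maxHeartbeats 2000000 in
theorem pv_key (depth : Int) : depth_bar_py depth = depth_bar_py_alt depth := by
  have hr : PySem.List.pyRange 0 6 1 = [0, 1, 2, 3, 4, 5] := by decide
  unfold depth_bar_py depth_bar_py_alt pvPipA pvStrMul
  rw [hr]
  rcases (by omega : depth ≤ 0 ∨ (0 < depth ∧ depth < 6) ∨ 6 ≤ depth) with h0 | h0 | h0
  · have hmax : max 0 (min depth 6) = 0 := by omega
    simp only [hmax, List.map, List.foldl, String.join,
      show ¬((0:Int) < depth) from by omega, show ¬((1:Int) < depth) from by omega,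
      show ¬((2:Int) < depth) from by omega, show ¬((3:Int) < depth) from by omega,
      show ¬((4:Int) < depth) from by omega, show ¬((5:Int) < depth) from by omega,
      ite_false, false_and]
    apply String.toList_inj.mp
    simp [String.toList_append]
  · obtain ⟨h1, h2⟩ := h0
    interval_cases depth <;> rfl
  · have hmax : max 0 (min depth 6) = 6 := by omega
    have h3 : ¬ depth < 3 := by omega
    simp only [hmax, List.map, List.foldl, String.join, h3,
      show ((0:Int) < depth) from by omega, show ((1:Int) < depth) from by omega,
      show ((2:Int) < depth) from by omega, show ((3:Int) < depth) from by omega,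
      show ((4:Int) < depth) from by omega, show ((5:Int) < depth) from by omega,
      and_false, if_false, if_true]
    apply String.toList_inj.mp
    simp [String.toList_append]

-- ===== VERDICT (by name: the statement is the Claim_ definition above) =====
theorem depth_bar_py_spec : Claim_equal_depth_bar_py := by
  intro depth _
  unfold Spec_depth_bar_py
  exact pv_key depth
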